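-- pv_equiv track=rewrite | github.com/amin942001/STHype | sthype/classes/hypergraph.py | match_edges
-- ===== SOURCE A (Python) =====
-- def match_edges(
--     in_edges: list[tuple[int, int, int]], out_edges: list[tuple[int, int, int]]
-- ) -> list[tuple[tuple[int, int], tuple[int, int]]]:
--     if not in_edges or not out_edges:
--         return []
--
--     start = in_edges[0][1:3]
--     end = out_edges[0][1:3]
--     if end == start:
--         if len(out_edges) == 1:
--             return []
--         end = out_edges[1][1:3]
--     matched = (start, end)
--     return [matched] + match_edges(
--         [edge for edge in in_edges if edge[1:3] not in matched],
--         [edge for edge in out_edges if edge[1:3] not in matched],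
--     )
-- ===== SOURCE B (Python) =====
-- def match_edges(
--     in_edges: list[tuple[int, int, int]], out_edges: list[tuple[int, int, int]]
-- ) -> list[tuple[tuple[int, int], tuple[int, int]]]:
--     res = []
--     used = set()
--     n, m = len(in_edges), len(out_edges)
--     i = j = 0
--     while True:
--         while i < n and in_edges[i][1:3] in used:
--             i += 1
--         if i == n:
--             break
--         start = in_edges[i][1:3]
--         while j < m and out_edges[j][1:3] in used:
--             j += 1
--         if j == m:
--             break
--         end = out_edges[j][1:3]
--         if end == start:
--             j += 1
--             while j < m and out_edges[j][1:3] in used: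
--                 j += 1
--             if j == m:
--                 break
--             end = out_edges[j][1:3]
--         res.append((start, end))
--         used.add(start)
--         used.add(end)
--         i += 1
--         j += 1
--     return res
-- ===== Notes on version B (the rewrite author's own statement) =====
-- stated objective: faster
-- what changed: A recursively rebuilds both lists each round by filtering out the matched keys (quadratic); B makes a single forward pass with two advancing positions and a set of used keys.
import Mathlib
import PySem

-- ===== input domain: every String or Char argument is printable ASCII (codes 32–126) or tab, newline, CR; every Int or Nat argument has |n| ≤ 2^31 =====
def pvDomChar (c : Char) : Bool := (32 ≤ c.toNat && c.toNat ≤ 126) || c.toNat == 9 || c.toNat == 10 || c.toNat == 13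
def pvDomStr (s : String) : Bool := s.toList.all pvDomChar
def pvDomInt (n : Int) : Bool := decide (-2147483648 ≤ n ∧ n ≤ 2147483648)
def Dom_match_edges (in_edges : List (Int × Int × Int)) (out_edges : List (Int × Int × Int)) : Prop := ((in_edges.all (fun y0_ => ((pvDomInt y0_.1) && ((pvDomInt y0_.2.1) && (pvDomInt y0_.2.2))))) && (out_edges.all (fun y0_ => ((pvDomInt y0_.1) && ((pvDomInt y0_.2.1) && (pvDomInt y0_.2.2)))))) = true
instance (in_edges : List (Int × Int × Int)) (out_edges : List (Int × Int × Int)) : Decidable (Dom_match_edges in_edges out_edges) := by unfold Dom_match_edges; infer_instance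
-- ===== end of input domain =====

-- B replaces A's quadratic filter-and-recurse with one forward pass over both lists
-- using a used-key set and advancing positions (objective: faster, asymptotic).

-- edge[1:3]
def pvKey (e : Int × Int × Int) : Int × Int := (e.2.1, e.2.2)

-- ===== PORT A =====
-- 'edge[1:3] not in matched'
def pvNotMatched (m : (Int × Int) × (Int × Int)) (e : Int × Int × Int) : Bool :=
  !(pvKey e == m.1 || pvKey e == m.2)

def match_edges : List (Int × Int × Int) → List (Int × Int × Int) → List ((Int × Int) × (Int × Int))
  | [], _ => []
  | _ :: _, [] => []
  | e0 :: ins, f0 :: fs =>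
    let start := pvKey e0
    let end0 := pvKey f0
    if end0 = start then
      match fs with
      | [] => []
      | f1 :: _ =>
        let matched := (start, pvKey f1)
        matched :: match_edges ((e0 :: ins).filter (pvNotMatched matched))
                               ((f0 :: fs).filter (pvNotMatched matched))
    else
      let matched := (start, end0)
      matched :: match_edges ((e0 :: ins).filter (pvNotMatched matched))
                             ((f0 :: fs).filter (pvNotMatched matched))
termination_by ins _ => ins.length
decreasing_by
  all_goals
    simp only [List.filter_cons, pvNotMatched, pvKey, BEq.rfl, Bool.true_or, Bool.not_true,
      if_neg (by simp : ¬ (false = true))]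
    exact Nat.lt_succ_of_le (List.length_filter_le _ _)

-- ===== PORT B =====
-- 'edge[1:3] in used'
def pvUsed (used : PySem.Set (Int × Int)) (e : Int × Int × Int) : Bool :=
  PySem.Set.contains used (pvKey e)

-- the 'while True' loop of B: inner while-skips are dropWhile / the head test, state = used set
def matchGo : List (Int × Int × Int) → List (Int × Int × Int) → PySem.Set (Int × Int) → List ((Int × Int) × (Int × Int))
  | [], _, _ => []
  | e :: ins, outs, used =>
    if pvUsed used e then matchGo ins outs used
    else
      let start := pvKey e
      match outs.dropWhile (pvUsed used) with
      | [] => []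
      | f :: outs' =>
        if pvKey f = start then
          match outs'.dropWhile (pvUsed used) with
          | [] => []
          | g :: outs'' =>
            (start, pvKey g) ::
              matchGo ins outs'' (PySem.Set.add (PySem.Set.add used start) (pvKey g))
        else
          (start, pvKey f) ::
            matchGo ins outs' (PySem.Set.add (PySem.Set.add used start) (pvKey f))

def match_edges_alt (in_edges : List (Int × Int × Int)) (out_edges : List (Int × Int × Int)) : List ((Int × Int) × (Int × Int)) :=
  matchGo in_edges out_edges PySem.Set.empty

-- ===== PRECONDITION & SPEC =====
def Spec_match_edges (in_edges : List (Int × Int × Int)) (out_edges : List (Int × Int × Int)) (out : List ((Int × Int) × (Int × Int))) : Prop := out = match_edges_alt in_edges out_edges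
instance (in_edges : List (Int × Int × Int)) (out_edges : List (Int × Int × Int)) (out : List ((Int × Int) × (Int × Int))) : Decidable (Spec_match_edges in_edges out_edges out) := by unfold Spec_match_edges; infer_instance

-- ===== CLAIM (what is proved, stated in full; the proofs are below) =====
def Claim_equal_match_edges : Prop := ∀ (in_edges : List (Int × Int × Int)) (out_edges : List (Int × Int × Int)), Dom_match_edges in_edges out_edges → Spec_match_edges in_edges out_edges (match_edges in_edges out_edges)

-- ===== LEMMAS AND PROOFS =====

theorem pv_filter_dropWhile {α : Type} (q : α → Bool) (l : List α) :
    (l.dropWhile q).filter (fun x => !q x) = l.filter (fun x => !q x) := by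
  induction l with
  | nil => simp
  | cons a l ih => cases hq : q a <;> simp [List.dropWhile_cons, hq, List.filter_cons, ih]

theorem pv_dropWhile_head_false {α : Type} (q : α → Bool) {l : List α} {a : α} {t : List α}
    (h : l.dropWhile q = a :: t) : q a = false := by
  induction l with
  | nil => simp at h
  | cons b l ih =>
    cases hb : q b
    · simp [List.dropWhile_cons, hb] at h
      rw [← h.1]; exact hb
    · simp [List.dropWhile_cons, hb] at h
      exact ih h

theorem pv_contains_add2 (s : PySem.Set (Int × Int)) (a b k : Int × Int) :
    PySem.Set.contains (PySem.Set.add (PySem.Set.add s a) b) k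
      = (PySem.Set.contains s k || k == a || k == b) := by
  rw [Bool.eq_iff_iff]
  simp [PySem.Set.contains_iff, PySem.Set.mem_add]

theorem pv_notUsed_empty (l : List (Int × Int × Int)) :
    l.filter (fun e => !pvUsed PySem.Set.empty e) = l := by
  simp [pvUsed, PySem.Set.empty, List.filter]

-- combined filter: A's matched-filter after the used-filter is the used'-filter
theorem pv_filter_combine (used : PySem.Set (Int × Int)) (a b : Int × Int)
    (l : List (Int × Int × Int)) :
    (l.filter (fun e => !pvUsed used e)).filter (pvNotMatched (a, b))
      = l.filter (fun e => !pvUsed (PySem.Set.add (PySem.Set.add used a) b) e) := by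
  rw [List.filter_filter]
  apply List.filter_congr
  intro x _
  by_cases h1 : pvKey x = a <;> by_cases h2 : pvKey x = b <;>
    by_cases h3 : pvKey x ∈ used <;>
      simp [pvNotMatched, pvUsed, pv_contains_add2, h1, h2, h3, PySem.Set.contains_iff]

theorem pv_match_edges_cons_ne (e f : Int × Int × Int) (A B : List (Int × Int × Int))
    (h : ¬ pvKey f = pvKey e) :
    match_edges (e :: A) (f :: B)
      = (pvKey e, pvKey f) ::
          match_edges ((e :: A).filter (pvNotMatched (pvKey e, pvKey f)))
                      ((f :: B).filter (pvNotMatched (pvKey e, pvKey f))) := by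
  cases B <;> simp [match_edges, h]

theorem pv_go_eq (ins : List (Int × Int × Int)) :
    ∀ (outs : List (Int × Int × Int)) (used : PySem.Set (Int × Int)),
      matchGo ins outs used
        = match_edges (ins.filter (fun e => !pvUsed used e)) (outs.filter (fun e => !pvUsed used e)) := by
  induction ins with
  | nil => intro outs used; simp [matchGo, match_edges]
  | cons e ins ih =>
    intro outs used
    by_cases hu : pvUsed used e = true
    · simp [matchGo, hu, List.filter_cons, ih]
    · have hu' : pvUsed used e = false := by simpa using hu
      have hfin : (e :: ins).filter (fun x => !pvUsed used x)
          = e :: ins.filter (fun x => !pvUsed used x) := by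
        simp [List.filter_cons, hu']
      cases houts : outs.dropWhile (pvUsed used) with
      | nil =>
        have hfo : outs.filter (fun x => !pvUsed used x) = [] := by
          rw [← pv_filter_dropWhile (pvUsed used) outs, houts]; rfl
        simp [matchGo, hu', houts, hfo, hfin, match_edges]
      | cons f outs' =>
        have hf : pvUsed used f = false := pv_dropWhile_head_false _ houts
        have hfo : outs.filter (fun x => !pvUsed used x)
            = f :: outs'.filter (fun x => !pvUsed used x) := by
          rw [← pv_filter_dropWhile (pvUsed used) outs, houts]
          simp [List.filter_cons, hf]
        by_cases heq : pvKey f = pvKey e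
        · cases houts2 : outs'.dropWhile (pvUsed used) with
          | nil =>
            have hfo2 : outs'.filter (fun x => !pvUsed used x) = [] := by
              rw [← pv_filter_dropWhile (pvUsed used) outs', houts2]; rfl
            simp [matchGo, hu', houts, heq, houts2, hfin, hfo, hfo2, match_edges]
          | cons g outs'' =>
            have hg : pvUsed used g = false := pv_dropWhile_head_false _ houts2
            have hfo2 : outs'.filter (fun x => !pvUsed used x)
                = g :: outs''.filter (fun x => !pvUsed used x) := by
              rw [← pv_filter_dropWhile (pvUsed used) outs', houts2]
              simp [List.filter_cons, hg]
            rw [hfin, hfo, hfo2]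
            simp only [matchGo, hu', houts, heq, houts2, Bool.false_eq_true, if_false, if_true,
              match_edges]
            congr 1
            · -- recursive calls agree, after combining the filters
              rw [ih outs'' (PySem.Set.add (PySem.Set.add used (pvKey e)) (pvKey g))]
              have h1 : ((e :: ins.filter (fun x => !pvUsed used x)).filter
                  (pvNotMatched (pvKey e, pvKey g)))
                  = ins.filter (fun x => !pvUsed (PySem.Set.add (PySem.Set.add used (pvKey e)) (pvKey g)) x) := by
                rw [← hfin, ← pv_filter_combine]
                rw [hfin]
                simp [List.filter_cons, pvNotMatched, pvKey]
              have h2 : ((f :: g :: outs''.filter (fun x => !pvUsed used x)).filter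
                  (pvNotMatched (pvKey e, pvKey g)))
                  = outs''.filter (fun x => !pvUsed (PySem.Set.add (PySem.Set.add used (pvKey e)) (pvKey g)) x) := by
                rw [← hfo2, ← hfo, ← pv_filter_combine]
                rw [hfo, hfo2]
                simp [List.filter_cons, pvNotMatched, heq, pvKey]
                exact fun hc => absurd heq hc
              rw [h1, h2]
        · rw [hfin, hfo]
          simp only [matchGo, hu', houts, heq, Bool.false_eq_true, if_false]
          rw [pv_match_edges_cons_ne _ _ _ _ heq]
          congr 1
          · rw [ih outs' (PySem.Set.add (PySem.Set.add used (pvKey e)) (pvKey f))]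
            have h1 : ((e :: ins.filter (fun x => !pvUsed used x)).filter
                (pvNotMatched (pvKey e, pvKey f)))
                = ins.filter (fun x => !pvUsed (PySem.Set.add (PySem.Set.add used (pvKey e)) (pvKey f)) x) := by
              rw [← hfin, ← pv_filter_combine]
              rw [hfin]
              simp [List.filter_cons, pvNotMatched, pvKey]
            have h2 : ((f :: outs'.filter (fun x => !pvUsed used x)).filter
                (pvNotMatched (pvKey e, pvKey f)))
                = outs'.filter (fun x => !pvUsed (PySem.Set.add (PySem.Set.add used (pvKey e)) (pvKey f)) x) := by
              rw [← hfo, ← pv_filter_combine]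
              rw [hfo]
              simp [List.filter_cons, pvNotMatched, pvKey]
            rw [h1, h2]

-- ===== VERDICT (by name: the statement is the Claim_ definition above) =====
theorem match_edges_spec : Claim_equal_match_edges := by
  intro ins outs _
  unfold Spec_match_edges match_edges_alt
  rw [pv_go_eq, pv_notUsed_empty, pv_notUsed_empty]
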